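/- GENERATED by farm/mkstatement.py from design/units.split.tsv — do not edit.
   THE SPLIT of the proof unit `vorbis_decode_packet_rest.3` into `vorbis_decode_packet_rest.3a`, `vorbis_decode_packet_rest.3b`, `vorbis_decode_packet_rest.3c`: the children's statements give the parent's
   UNCHANGED statement (so nothing above the parent — callers, compositions — is touched by the split). -/
import Vorbis.Spec.PacketRest3
import Vorbis.Spec.Units.vorbis_decode_packet_rest_3
import Vorbis.Spec.Units.vorbis_decode_packet_rest_3a
import Vorbis.Spec.Units.vorbis_decode_packet_rest_3b
import Vorbis.Spec.Units.vorbis_decode_packet_rest_3c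
namespace Vorbis.Spec.Splits
open X86 X86.User Asan

/-- The children of the split unit `vorbis_decode_packet_rest.3` prove it, by `Vorbis.Spec.vorbis_decode_packet_rest.Seg3.of_parts`. -/
theorem vorbis_decode_packet_rest_3
    (h_vorbis_decode_packet_rest_3a : Vorbis.Spec.vorbis_decode_packet_rest_3a.Statement)
    (h_vorbis_decode_packet_rest_3b : Vorbis.Spec.vorbis_decode_packet_rest_3b.Statement)
    (h_vorbis_decode_packet_rest_3c : Vorbis.Spec.vorbis_decode_packet_rest_3c.Statement) :
    Vorbis.Spec.vorbis_decode_packet_rest_3.Statement := by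
  intro Lay _hLay μ _hμ u₀ _hcode _h_prep_huffman _h_codebook_decode_scalar_raw _h_asan_load1_noabort _h_asan_load8_noabort _h_asan_load4_noabort _h_asan_load2_noabort
  apply Vorbis.Spec.vorbis_decode_packet_rest.Seg3.of_parts
  · exact h_vorbis_decode_packet_rest_3a Lay _hLay μ _hμ u₀ _hcode _h_prep_huffman _h_asan_load1_noabort _h_asan_load8_noabort _h_asan_load4_noabort
  · exact h_vorbis_decode_packet_rest_3b Lay _hLay μ _hμ u₀ _hcode _h_codebook_decode_scalar_raw _h_asan_load1_noabort _h_asan_load8_noabort _h_asan_load4_noabort _h_asan_load2_noabort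
  · exact h_vorbis_decode_packet_rest_3c Lay _hLay μ _hμ u₀ _hcode _h_asan_load1_noabort _h_asan_load8_noabort _h_asan_load4_noabort

end Vorbis.Spec.Splits
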